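-- pv_equiv track=rewrite | github.com/zlightho/algo | task5.py | SynchronizingTables
-- ===== SOURCE A (Python) =====
-- from typing import List
--
-- def find_smallest(arr: List):
--     """Get array and return index of the smallest element"""
--     smallest = arr[0]
--     smallest_index = 0
--     for i in range(1, len(arr)):
--         if arr[i] < smallest:
--             smallest = arr[i]
--             smallest_index = i
--             assert i >= -1
--     return smallest_index
--
-- def selectionSort(arr: List):
--     """Get array and return sorted array"""
--     new_arr = []
--     for i in range(len(arr)):
--         smallest = find_smallest(arr)
--         new_arr.append(arr.pop(smallest))
--     return new_arr
--
-- def SynchronizingTables(N: int, employee_numbers: List[int], salaries: List[int]):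
--     """Gets the length of both arrays by the parameter N.
--     The ids parameter is an array containing employee numbers,
--     the salary parameter is an array containing salaries.
--     The function returns an array containing the reordered salaries."""
--     number_salaries_dict = {}
--     copy_employee_numbers = employee_numbers[:]
--     copy_employee_salaries = salaries[:]
--     # Copy both lists
--     sort_salaries = selectionSort(copy_employee_salaries)
--     sort_number = selectionSort(copy_employee_numbers)
--     ordered_salaries = []
--     i = 0
--     # Fills the dictionary with sorted values
--     while i < len(sort_number):
--         number_salaries_dict[sort_number[i]] = sort_salaries[i]
--         i += 1
--
--     # Searches from the list of numbers for a match in the dictionary by key,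
--     # and adds it to the ordered list of salaries
--     for i in range(len(employee_numbers)):
--         for key, value in number_salaries_dict.items():
--             if employee_numbers[i] == key:
--                 ordered_salaries.append(value)
--
--     return ordered_salaries
-- ===== SOURCE B (Python) =====
-- from typing import List
--
-- def SynchronizingTables(N: int, employee_numbers: List[int], salaries: List[int]):
--     """Pair each employee number with a salary by rank: sort both lists once,
--     map number -> salary, then look each original number up directly."""
--     rank = dict(zip(sorted(employee_numbers), sorted(salaries)))
--     return [rank[n] for n in employee_numbers]
-- ===== Notes on version B (the rewrite author's own statement) =====
-- stated objective: faster
-- what changed: B replaces A's two O(n^2) selection sorts (repeated find-min + pop) and the per-element linear scan over all dict items by two library sorts, one zip-built dict and a direct O(1) lookup per employee number.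
import Mathlib
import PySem

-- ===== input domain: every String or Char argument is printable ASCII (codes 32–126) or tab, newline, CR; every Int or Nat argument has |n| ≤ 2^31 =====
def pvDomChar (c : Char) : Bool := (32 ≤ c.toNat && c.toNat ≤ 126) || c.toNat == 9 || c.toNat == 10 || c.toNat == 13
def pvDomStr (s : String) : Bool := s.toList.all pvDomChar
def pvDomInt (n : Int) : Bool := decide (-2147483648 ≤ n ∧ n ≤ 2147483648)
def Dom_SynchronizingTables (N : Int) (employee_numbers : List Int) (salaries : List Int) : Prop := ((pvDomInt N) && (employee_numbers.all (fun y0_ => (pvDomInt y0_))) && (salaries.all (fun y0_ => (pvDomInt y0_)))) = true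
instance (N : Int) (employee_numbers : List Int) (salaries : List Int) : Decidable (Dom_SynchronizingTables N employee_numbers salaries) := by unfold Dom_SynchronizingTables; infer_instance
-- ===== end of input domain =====

-- B sorts both lists with the library sort, builds the number→salary dict from the zip,
-- and looks each employee number up directly, instead of A's selection sorts and per-number item scans (objective: faster).


-- ===== PORT A =====

-- 'for i in range(1, len(arr)): if arr[i] < smallest: …' — structural recursion over the rest of the list,
-- carrying the running index i, the current smallest value and its index.
def findSmallestGo : List Int → Nat → Int → Nat → Nat
  | [], _, _, sidx => sidx
  | v :: rs, i, smallest, sidx =>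
    if v < smallest then findSmallestGo rs (i + 1) v i
    else findSmallestGo rs (i + 1) smallest sidx

def findSmallest (arr : List Int) : Nat :=
  match arr with
  | [] => 0  -- Python raises IndexError on arr[0]; selectionSort never calls find_smallest on []
  | a :: rest => findSmallestGo rest 1 a 0

-- 'for i in range(len(arr)): new_arr.append(arr.pop(find_smallest(arr)))' — the loop counter is the fuel.
def selSortGo : Nat → List Int → List Int
  | 0, _ => []
  | n + 1, arr =>
    match PySem.List.pop? arr ((findSmallest arr : Nat) : Int) with
    | some (v, rest) => v :: selSortGo n rest
    | none => []  -- unreachable: findSmallest's index is always in range of a nonempty arr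

def selectionSort (arr : List Int) : List Int := selSortGo arr.length arr

-- 'while i < len(sort_number): dict[sort_number[i]] = sort_salaries[i]; i += 1'
def fillDict (sn ss : List Int) (i : Nat) (d : PySem.Dict Int Int) : PySem.Dict Int Int :=
  if h : i < sn.length then
    match ss[i]? with
    | some v => fillDict sn ss (i + 1) (d.insert sn[i] v)
    | none => d  -- Python raises IndexError here; excluded by Pre_
  else d
  termination_by sn.length - i

def SynchronizingTables (N : Int) (employee_numbers : List Int) (salaries : List Int) : List Int :=
  let sort_salaries := selectionSort salaries
  let sort_number := selectionSort employee_numbers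
  let d := fillDict sort_number sort_salaries 0 PySem.Dict.empty
  -- 'for i in range(len(employee_numbers)): for key, value in d.items(): if employee_numbers[i] == key: append value'
  -- (indexing with i in range(len(xs)) is exactly traversal of xs's elements)
  employee_numbers.foldl
    (fun acc n => d.items.foldl (fun acc kv => if n == kv.1 then acc ++ [kv.2] else acc) acc) []

-- ===== PORT B =====
def SynchronizingTables_alt (N : Int) (employee_numbers : List Int) (salaries : List Int) : List Int :=
  -- rank = dict(zip(sorted(employee_numbers), sorted(salaries)))
  let rank : PySem.Dict Int Int :=
    ((PySem.List.sorted employee_numbers (fun x => x) false).zip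
      (PySem.List.sorted salaries (fun x => x) false)).foldl
      (fun d p => d.insert p.1 p.2) PySem.Dict.empty
  -- [rank[n] for n in employee_numbers]; under Pre_ every n is a key of rank, so rank[n] never
  -- raises KeyError and the getD default is never used
  employee_numbers.map (fun n => rank.getD n 0)

-- ===== PRECONDITION & SPEC =====
-- A raises IndexError (sort_salaries[i] in the dict-filling loop) whenever salaries is shorter
-- than employee_numbers; exactly those inputs are excluded.
def Pre_SynchronizingTables (N : Int) (employee_numbers : List Int) (salaries : List Int) : Prop :=
  employee_numbers.length ≤ salaries.length
instance (N : Int) (employee_numbers : List Int) (salaries : List Int) : Decidable (Pre_SynchronizingTables N employee_numbers salaries) := by unfold Pre_SynchronizingTables; infer_instance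

def pvWitness_SynchronizingTables : Int × List Int × List Int := (3, [3, 1, 2], [30, 10, 20])

def Spec_SynchronizingTables (N : Int) (employee_numbers : List Int) (salaries : List Int) (out : List Int) : Prop := out = SynchronizingTables_alt N employee_numbers salaries
instance (N : Int) (employee_numbers : List Int) (salaries : List Int) (out : List Int) : Decidable (Spec_SynchronizingTables N employee_numbers salaries out) := by unfold Spec_SynchronizingTables; infer_instance

-- ===== CLAIM (what is proved, stated in full; the proofs are below) =====
def Claim_equal_SynchronizingTables : Prop := ∀ (N : Int) (employee_numbers : List Int) (salaries : List Int), Dom_SynchronizingTables N employee_numbers salaries → Pre_SynchronizingTables N employee_numbers salaries → Spec_SynchronizingTables N employee_numbers salaries (SynchronizingTables N employee_numbers salaries)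

-- ===== LEMMAS AND PROOFS =====

-- find_smallest's loop either keeps the seed index (the seed is minimal) or lands on a
-- minimal element of the remaining list.
theorem fsGo_spec (rest : List Int) (i : Nat) (smallest : Int) (sidx : Nat) :
    (findSmallestGo rest i smallest sidx = sidx ∧ ∀ y ∈ rest, smallest ≤ y) ∨
    (∃ j, ∃ _ : j < rest.length, findSmallestGo rest i smallest sidx = i + j ∧
      rest[j] ≤ smallest ∧ ∀ y ∈ rest, rest[j] ≤ y) := by
  induction rest generalizing i smallest sidx with
  | nil => exact Or.inl ⟨rfl, by simp⟩
  | cons v rs ih =>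
    simp only [findSmallestGo]
    by_cases hv : v < smallest
    · rw [if_pos hv]
      right
      rcases ih (i + 1) v i with ⟨heq, hall⟩ | ⟨j, hj, heq, hle, hall⟩
      · refine ⟨0, by simp, by simpa using heq, by simpa using hv.le, ?_⟩
        intro y hy
        rcases List.mem_cons.1 hy with h | h
        · simp [h]
        · simpa using hall y h
      · refine ⟨j + 1, by simpa using Nat.succ_lt_succ hj, by rw [heq]; omega, ?_, ?_⟩
        · simpa using le_trans hle hv.le
        · intro y hy
          rcases List.mem_cons.1 hy with h | h
          · simpa [h] using hle
          · simpa using hall y h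
    · rw [if_neg hv]
      rcases ih (i + 1) smallest sidx with ⟨heq, hall⟩ | ⟨j, hj, heq, hle, hall⟩
      · left
        refine ⟨heq, ?_⟩
        intro y hy
        rcases List.mem_cons.1 hy with h | h
        · exact h ▸ not_lt.1 hv
        · exact hall y h
      · right
        refine ⟨j + 1, by simpa using Nat.succ_lt_succ hj, by rw [heq]; omega, by simpa using hle, ?_⟩
        intro y hy
        rcases List.mem_cons.1 hy with h | h
        · simpa [h] using le_trans hle (not_lt.1 hv)
        · simpa using hall y h

theorem findSmallest_spec (a : Int) (rest : List Int) :
    ∃ _ : findSmallest (a :: rest) < (a :: rest).length,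
      ∀ y ∈ a :: rest, (a :: rest).getD (findSmallest (a :: rest)) 0 ≤ y := by
  have hfs : findSmallest (a :: rest) = findSmallestGo rest 1 a 0 := rfl
  rcases fsGo_spec rest 1 a 0 with ⟨heq, hall⟩ | ⟨j, hj, heq, hle, hall⟩
  · refine ⟨by rw [hfs, heq]; simp, ?_⟩
    intro y hy
    rw [hfs, heq]
    rcases List.mem_cons.1 hy with h | h
    · simp [h]
    · simpa using hall y h
  · have h1 : (1 : Nat) + j = j + 1 := by omega
    refine ⟨by rw [hfs, heq, h1]; simpa using Nat.succ_lt_succ hj, ?_⟩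
    intro y hy
    have hidx : (a :: rest).getD (j + 1) 0 = rest[j] := by
      simp [List.getD, List.getElem?_eq_getElem hj]
    rw [hfs, heq, h1, hidx]
    rcases List.mem_cons.1 hy with h | h
    · exact h ▸ hle
    · exact hall y h

theorem selSortGo_spec (n : Nat) (arr : List Int) (h : arr.length = n) :
    (selSortGo n arr).Perm arr ∧ (selSortGo n arr).Pairwise (· ≤ ·) := by
  induction n generalizing arr with
  | zero =>
    have : arr = [] := List.eq_nil_of_length_eq_zero h
    subst this
    simp [selSortGo]
  | succ n ih =>
    obtain ⟨a, rest, rfl⟩ := List.exists_cons_of_ne_nil (l := arr) (by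
      intro hnil; subst hnil; simp at h)
    obtain ⟨hk, hmin⟩ := findSmallest_spec a rest
    simp only [selSortGo]
    rw [PySem.List.pop?_natCast _ _ hk]
    have hlen : ((a :: rest).eraseIdx (findSmallest (a :: rest))).length = n := by
      rw [List.length_eraseIdx_of_lt hk]; omega
    obtain ⟨ihp, ihs⟩ := ih _ hlen
    have hperm : ((a :: rest)[findSmallest (a :: rest)] ::
        selSortGo n ((a :: rest).eraseIdx (findSmallest (a :: rest)))).Perm (a :: rest) :=
      (ihp.cons _).trans (List.getElem_cons_eraseIdx_perm hk)
    refine ⟨hperm, List.pairwise_cons.2 ⟨?_, ihs⟩⟩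
    intro y hy
    have hy' : y ∈ a :: rest :=
      List.mem_of_mem_eraseIdx (ihp.mem_iff.1 hy)
    have := hmin y hy'
    rwa [List.getD, List.getElem?_eq_getElem hk, Option.getD_some] at this

theorem selectionSort_eq_sorted (arr : List Int) :
    PySem.List.sorted arr (fun x => x) false = selectionSort arr := by
  obtain ⟨hp, hs⟩ := selSortGo_spec arr.length arr rfl
  exact PySem.List.sorted_id_eq_of_perm_of_pairwise _ _ hp hs

theorem selectionSort_perm (arr : List Int) : (selectionSort arr).Perm arr :=
  (selSortGo_spec arr.length arr rfl).1

-- the while loop filling the dict is the fold of insert over the zip (when salaries are long enough)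
theorem fillDict_eq (sn ss : List Int) (hlen : sn.length ≤ ss.length) :
    ∀ (fuel i : Nat) (d : PySem.Dict Int Int), sn.length - i ≤ fuel →
      fillDict sn ss i d =
        ((sn.drop i).zip (ss.drop i)).foldl (fun d p => d.insert p.1 p.2) d := by
  intro fuel
  induction fuel with
  | zero =>
    intro i d hf
    have hge : sn.length ≤ i := by omega
    rw [fillDict, dif_neg (by omega)]
    rw [List.drop_eq_nil_of_le hge]
    simp
  | succ fuel ih =>
    intro i d hf
    by_cases hi : i < sn.length
    · have hi' : i < ss.length := lt_of_lt_of_le hi hlen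
      rw [fillDict, dif_pos hi, List.getElem?_eq_getElem hi']
      rw [List.drop_eq_getElem_cons hi, List.drop_eq_getElem_cons hi', List.zip_cons_cons,
        List.foldl_cons]
      exact ih (i + 1) _ (by omega)
    · rw [fillDict, dif_neg hi]
      rw [List.drop_eq_nil_of_le (by omega)]
      simp

-- A's inner scan over all dict items collects exactly the one value stored at key n
theorem inner_scan (d : PySem.Dict Int Int) (hnd : d.keys.Nodup) (n : Int)
    (hn : n ∈ d.keys) (acc : List Int) :
    d.items.foldl (fun acc kv => if n == kv.1 then acc ++ [kv.2] else acc) acc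
      = acc ++ [d.getD n 0] := by
  rw [PySem.List.foldl_append_if (fun kv : Int × Int => n == kv.1) (fun kv : Int × Int => kv.2)]
  rw [PySem.Dict.items_eq_map_keys d hnd 0, List.filter_map]
  have hfun : ((fun kv : Int × Int => n == kv.1) ∘ (fun k : Int => (k, d.getD k 0)))
      = (fun k : Int => k == n) := by
    funext k
    simp [Function.comp, eq_comm]
  rw [hfun, List.filter_beq, List.count_eq_one_of_mem hnd hn]
  simp

-- ===== VERDICT (by name: the statement is the Claim_ definition above) =====
theorem SynchronizingTables_spec : Claim_equal_SynchronizingTables := by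
  intro N nums sals _ hpre
  show SynchronizingTables N nums sals = SynchronizingTables_alt N nums sals
  simp only [SynchronizingTables, SynchronizingTables_alt]
  rw [selectionSort_eq_sorted, selectionSort_eq_sorted]
  have hlen : (selectionSort nums).length ≤ (selectionSort sals).length := by
    rw [(selectionSort_perm nums).length_eq, (selectionSort_perm sals).length_eq]
    exact hpre
  rw [fillDict_eq _ _ hlen (selectionSort nums).length 0 _ (by omega)]
  simp only [List.drop_zero]
  set d : PySem.Dict Int Int :=
    ((selectionSort nums).zip (selectionSort sals)).foldl
      (fun d p => d.insert p.1 p.2) PySem.Dict.empty with hd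
  have hnd : d.keys.Nodup := by
    rw [hd]
    exact PySem.Dict.nodup_keys_foldl_insert_key _ Prod.fst _ _ PySem.Dict.nodup_keys_empty
  have hkeys : ∀ n ∈ nums, n ∈ d.keys := by
    intro n hn
    rw [hd, PySem.Dict.keys_foldl_insert_key _ Prod.fst, PySem.Dict.keys_empty,
      List.map_fst_zip hlen]
    show n ∈ PySem.Set.update [] (selectionSort nums)
    have : PySem.Set.update [] (selectionSort nums) = PySem.Set.ofList (selectionSort nums) := by
      rw [PySem.Set.ofList_eq_foldl]; rfl
    rw [this, PySem.Set.mem_ofList]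
    exact (selectionSort_perm nums).mem_iff.2 hn
  have h1 : List.foldl
      (fun acc n => d.items.foldl (fun acc kv => if n == kv.1 then acc ++ [kv.2] else acc) acc)
      [] nums = List.foldl (fun acc n => acc ++ [d.getD n 0]) [] nums :=
    PySem.List.foldl_congr_mem' _ _ _ _ (fun n hn acc => inner_scan d hnd n (hkeys n hn) acc)
  rw [h1, PySem.List.foldl_append_singleton_eq_map]
  simp
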